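-- pv_equiv track=rewrite | github.com/avanpo/cryptobin | language/anagram.py | search
-- ===== SOURCE A (Python) =====
-- import itertools
-- import string
--
-- def search(anagrams, partial, unknown):
--     """Search anagrams for possible matches with a number of unknown."""
--     sols = set()
--     for letters in map(
--             "".join,
--             itertools.combinations_with_replacement(string.ascii_lowercase,
--                                                     unknown)):
--         sorted_str = "".join(sorted(partial + letters))
--         if sorted_str in anagrams:
--             sols.add(sorted_str)
--     return sols
-- ===== SOURCE B (Python) =====
-- import string
--
--
-- def search(anagrams, partial, unknown):
--     """Search anagrams for possible matches with a number of unknown."""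
--     total = len(partial) + unknown
--     sols = set()
--     for s in sorted(anagrams):
--         if len(s) == total and feasible(s, partial):
--             sols.add(s)
--     return sols
--
--
-- def feasible(s, partial):
--     """s must be sorted and contain partial's letters; the leftover letters
--     (those a combination of unknowns would have to supply) must be lowercase."""
--     chars = sorted(s)
--     if list(s) != chars:
--         return False
--     for c in partial:
--         if c in chars:
--             chars.remove(c)
--         else:
--             return False
--     return all(c in string.ascii_lowercase for c in chars)
-- ===== Notes on version B (the rewrite author's own statement) =====
-- stated objective: faster
-- what changed: Instead of enumerating all C(25+u,u) combinations of u unknown lowercase letters and probing the anagram set, B scans the anagram set once and keeps entries of the right length that are sorted, contain partial's letters as a multiset, and whose leftover letters are lowercase; intended as faster: a timing run saw A time out at n=64 where B returned, while at the sizes both finished the times were too small to measure a ratio (A 0.28 ms / B 0.22 ms, 1.22x).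
import Mathlib
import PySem

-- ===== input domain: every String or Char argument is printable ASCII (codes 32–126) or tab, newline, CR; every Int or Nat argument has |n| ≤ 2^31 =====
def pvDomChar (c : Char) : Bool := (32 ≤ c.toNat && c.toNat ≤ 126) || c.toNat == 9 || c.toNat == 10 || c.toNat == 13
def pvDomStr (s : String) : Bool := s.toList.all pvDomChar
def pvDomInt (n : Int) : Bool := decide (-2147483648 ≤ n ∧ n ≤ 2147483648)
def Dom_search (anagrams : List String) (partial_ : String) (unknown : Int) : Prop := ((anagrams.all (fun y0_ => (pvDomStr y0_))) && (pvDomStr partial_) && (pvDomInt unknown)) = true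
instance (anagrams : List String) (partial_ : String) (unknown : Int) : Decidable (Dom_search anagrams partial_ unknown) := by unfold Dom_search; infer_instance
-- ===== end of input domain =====

-- B scans the anagram set once (in sorted order) and keeps entries of the right length whose
-- multiset contains partial's letters with lowercase leftovers, instead of A's enumeration of all
-- C(25+u,u) letter combinations; return values are Python sets, compared as sets.

-- ===== PORT A =====
-- string.ascii_lowercase
def lowercaseChars : List Char :=
  ['a','b','c','d','e','f','g','h','i','j','k','l','m','n','o','p','q','r','s','t','u','v','w','x','y','z']

-- itertools.combinations_with_replacement(pool, r), in its exact yield order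
-- (lexicographic by position in pool): each combination starts with some pool element x and
-- continues with a combination drawn from the suffix of pool beginning at x.
def cwr : Nat → List Char → List (List Char)
  | 0, _ => [[]]
  | r+1, pool =>
      pool.tails.flatMap (fun sfx =>
        match sfx with
        | [] => []
        | x :: xs => (cwr r (x :: xs)).map (fun l => x :: l))

def search (anagrams : List String) (partial_ : String) (unknown : Int) : List String :=
  (cwr unknown.toNat lowercaseChars).foldl
    (fun sols letters =>
      let sorted_str := String.ofList (PySem.List.sorted (partial_.toList ++ letters) (fun c => c))
      if anagrams.contains sorted_str then PySem.Set.add sols sorted_str else sols)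
    PySem.Set.empty

-- ===== PORT B =====
-- the for-loop of feasible: for c in partial: if c in chars: chars.remove(c) else: return False
-- then: return all(c in string.ascii_lowercase for c in chars).
-- list.remove under the membership guard removes the first occurrence = List.erase
-- (PySem.List.remove?_eq_some_erase); 'c in string.ascii_lowercase' for a single character is
-- exactly character membership in the 26 lowercase letters.
def feasibleLoop : List Char → List Char → Bool
  | [], chars => chars.all (fun c => lowercaseChars.contains c)
  | c :: rest, chars => if chars.contains c then feasibleLoop rest (chars.erase c) else false

def feasible (s partial_ : String) : Bool :=
  let chars := PySem.List.sorted s.toList (fun c => c)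
  if s.toList = chars then feasibleLoop partial_.toList chars else false

def search_alt (anagrams : List String) (partial_ : String) (unknown : Int) : List String :=
  let total : Int := PySem.Str.len partial_ + unknown
  (PySem.List.sorted anagrams (fun s => s)).foldl
    (fun sols s =>
      if PySem.Str.len s == total && feasible s partial_ then PySem.Set.add sols s else sols)
    PySem.Set.empty

-- ===== PRECONDITION & SPEC =====
-- Pre_ excludes exactly the inputs where A raises: combinations_with_replacement raises
-- ValueError for a negative count of unknowns.
def Pre_search (anagrams : List String) (partial_ : String) (unknown : Int) : Prop := 0 ≤ unknown
instance (anagrams : List String) (partial_ : String) (unknown : Int) : Decidable (Pre_search anagrams partial_ unknown) := by unfold Pre_search; infer_instance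
def pvWitness_search : List String × String × Int := (["abc"], "b", 2)

def Spec_search (anagrams : List String) (partial_ : String) (unknown : Int) (out : List String) : Prop := out = search_alt anagrams partial_ unknown
instance (anagrams : List String) (partial_ : String) (unknown : Int) (out : List String) : Decidable (Spec_search anagrams partial_ unknown out) := by unfold Spec_search; infer_instance

-- ===== CLAIM (what is proved, stated in full; the proofs are below) =====
def Claim_equal_search : Prop := ∀ (anagrams : List String) (partial_ : String) (unknown : Int), Dom_search anagrams partial_ unknown → Pre_search anagrams partial_ unknown → Spec_search anagrams partial_ unknown (search anagrams partial_ unknown)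
-- ===== LEMMAS AND PROOFS =====

-- shape of both folds: conditionally adding into a set is ofList of the filtered list
theorem foldl_add_if_eq_ofList_filter (L : List String) (cond : String → Bool) :
    L.foldl (fun sols y => if cond y then PySem.Set.add sols y else sols) PySem.Set.empty
      = PySem.Set.ofList (L.filter cond) := by
  rw [PySem.Set.ofList_eq_foldl, List.foldl_filter]
  rfl

theorem foldl_add_eq_append_of_nodup : ∀ (l acc : List String), (acc ++ l).Nodup →
    l.foldl PySem.Set.add acc = acc ++ l := by
  intro l
  induction l with
  | nil => simp
  | cons a t ih =>
    intro acc h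
    have ha : a ∉ acc := by
      intro hm
      exact (List.disjoint_of_nodup_append h) hm (by simp)
    have hadd : PySem.Set.add acc a = acc ++ [a] := by
      simp only [PySem.Set.add]
      rw [if_neg (by simpa [PySem.Set.contains_iff] using ha)]
    rw [List.foldl_cons, hadd, ih (acc ++ [a]) (by simpa using h)]
    simp

theorem sublist_foldl_add : ∀ (l acc : List String), (l.foldl PySem.Set.add acc).Sublist (acc ++ l) := by
  intro l
  induction l with
  | nil => simp
  | cons a t ih =>
    intro acc
    rw [List.foldl_cons]
    refine (ih (PySem.Set.add acc a)).trans ?_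
    by_cases h : PySem.Set.contains acc a = true
    · have : PySem.Set.add acc a = acc := by simp only [PySem.Set.add]; rw [if_pos h]
      rw [this]
      exact List.Sublist.append_left (List.sublist_cons_self a t) acc
    · have : PySem.Set.add acc a = acc ++ [a] := by simp only [PySem.Set.add]; rw [if_neg h]
      rw [this, List.append_assoc]
      simp

-- cwr produces lists of length r drawn from the pool
theorem length_of_mem_cwr : ∀ (r : Nat) (pool l : List Char), l ∈ cwr r pool → l.length = r := by
  intro r
  induction r with
  | zero => intro pool l h; simp [cwr] at h; simp [h]
  | succ r ih =>
    intro pool l h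
    simp only [cwr, List.mem_flatMap] at h
    obtain ⟨sfx, hsfx, hl⟩ := h
    match sfx with
    | [] => simp at hl
    | x :: xs =>
      simp only [List.mem_map] at hl
      obtain ⟨l', hl', rfl⟩ := hl
      simp [ih _ _ hl']

theorem subset_of_mem_cwr : ∀ (r : Nat) (pool l : List Char), l ∈ cwr r pool → ∀ c ∈ l, c ∈ pool := by
  intro r
  induction r with
  | zero => intro pool l h; simp [cwr] at h; simp [h]
  | succ r ih =>
    intro pool l h
    simp only [cwr, List.mem_flatMap] at h
    obtain ⟨sfx, hsfx, hl⟩ := h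
    match sfx with
    | [] => simp at hl
    | x :: xs =>
      rw [List.mem_tails] at hsfx
      simp only [List.mem_map] at hl
      obtain ⟨l', hl', rfl⟩ := hl
      intro c hc
      rcases List.mem_cons.mp hc with rfl | hc
      · exact hsfx.subset (by simp)
      · exact hsfx.subset (ih _ _ hl' c hc)

-- completeness: every nondecreasing list over a strictly increasing pool is produced
theorem mem_cwr_of_sorted : ∀ (l pool : List Char), pool.Pairwise (· < ·) →
    l.Pairwise (· ≤ ·) → (∀ c ∈ l, c ∈ pool) → l ∈ cwr l.length pool := by
  intro l
  induction l with
  | nil => intro pool _ _ _; simp [cwr]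
  | cons c l' ih =>
    intro pool hpool hsort hsub
    have hc : c ∈ pool := hsub c (by simp)
    obtain ⟨s, t, rfl⟩ := List.append_of_mem hc
    have hsfx : (c :: t) ∈ (s ++ c :: t).tails := by
      rw [List.mem_tails]; exact ⟨s, rfl⟩
    have hcross : ∀ a ∈ s, a < c := by
      intro a ha
      exact (List.pairwise_append.mp hpool).2.2 a ha c (by simp)
    have hsub' : ∀ e ∈ l', e ∈ c :: t := by
      intro e he
      have hce : c ≤ e := (List.pairwise_cons.mp hsort).1 e he
      rcases List.mem_append.mp (hsub e (by simp [he])) with hs | h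
      · exact absurd (hcross e hs) (not_lt.mpr hce)
      · exact h
    have hmem : l' ∈ cwr l'.length (c :: t) :=
      ih (c :: t) (List.pairwise_append.mp hpool).2.1 (List.pairwise_cons.mp hsort).2 hsub'
    show c :: l' ∈ cwr (l'.length + 1) (s ++ c :: t)
    simp only [cwr, List.mem_flatMap]
    exact ⟨c :: t, hsfx, by simp only [List.mem_map]; exact ⟨l', hmem, rfl⟩⟩

-- two nondecreasing char lists of equal length: strictly more copies of x (and equal counts
-- below x) makes the first lexicographically smaller
theorem lex_lt_of_counts : ∀ (s1 s2 : List Char) (x : Char), s1.Pairwise (· ≤ ·) →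
    s2.Pairwise (· ≤ ·) → s1.length = s2.length → s2.count x < s1.count x →
    (∀ c, c < x → s1.count c = s2.count c) → List.Lex (· < ·) s1 s2 := by
  intro s1
  induction s1 with
  | nil =>
    intro s2 x _ _ _ hx _
    simp at hx
  | cons a t1 ih =>
    intro s2 x h1 h2 hlen hx hlt
    match s2 with
    | [] => simp at hlen
    | b :: t2 =>
      rcases lt_trichotomy a b with hab | rfl | hba
      · exact List.Lex.rel hab
      · apply List.Lex.cons
        refine ih t2 x (List.pairwise_cons.mp h1).2 (List.pairwise_cons.mp h2).2 (by simpa using hlen) ?_ ?_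
        · by_cases hxa : x = a
          · subst hxa; simpa [List.count_cons_self] using hx
          · rw [List.count_cons_of_ne (Ne.symm hxa), List.count_cons_of_ne (Ne.symm hxa)] at hx; exact hx
        · intro c hc
          have hl := hlt c hc
          by_cases hca : c = a
          · subst hca; simpa [List.count_cons_self] using hl
          · rw [List.count_cons_of_ne (Ne.symm hca), List.count_cons_of_ne (Ne.symm hca)] at hl; exact hl
      · exfalso
        have hmins1 : ∀ e ∈ a :: t1, a ≤ e := by
          intro e he
          rcases List.mem_cons.mp he with rfl | he
          · exact le_refl _
          · exact (List.pairwise_cons.mp h1).1 e he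
        by_cases hbx : b < x
        · have hcnt : (a :: t1).count b = (b :: t2).count b := hlt b hbx
          have hb2 : 0 < (b :: t2).count b := by simp [List.count_cons_self]
          have hb1 : b ∈ a :: t1 := List.count_pos_iff.mp (by omega)
          exact absurd (hmins1 b hb1) (not_le.mpr hba)
        · have hxa : x < a := lt_of_le_of_lt (not_lt.mp hbx) hba
          have hx1 : x ∈ a :: t1 := List.count_pos_iff.mp (by omega)
          exact absurd (hmins1 x hx1) (not_le.mpr hxa)

theorem ofList_lt_iff (l1 l2 : List Char) :
    String.ofList l1 < String.ofList l2 ↔ List.Lex (· < ·) l1 l2 := by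
  simp only [String.lt_iff_toList_lt, List.lex_lt, String.toList_ofList]

-- the cross comparison: a candidate starting with x precedes any candidate drawn from
-- letters all greater than x
theorem cross_lt (P l l' : List Char) (x : Char)
    (hlen : l'.length = l.length + 1)
    (hl : ∀ c ∈ l, x ≤ c) (hl' : ∀ c ∈ l', x < c) :
    List.Lex (· < ·) (PySem.List.sorted (P ++ x :: l) (fun c => c))
      (PySem.List.sorted (P ++ l') (fun c => c)) := by
  apply lex_lt_of_counts _ _ x
  · simpa using PySem.List.sorted_pairwise (P ++ x :: l) (fun c => c)
  · simpa using PySem.List.sorted_pairwise (P ++ l') (fun c => c)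
  · simp [PySem.List.length_sorted, hlen]
  · rw [(PySem.List.sorted_perm (P ++ x :: l) (fun c => c) false).count_eq,
        (PySem.List.sorted_perm (P ++ l') (fun c => c) false).count_eq]
    have h1 : l'.count x = 0 := by
      rw [List.count_eq_zero]
      intro hm
      exact absurd (hl' x hm) (lt_irrefl x)
    simp [List.count_append, List.count_cons_self, h1]
  · intro c hc
    rw [(PySem.List.sorted_perm (P ++ x :: l) (fun c => c) false).count_eq,
        (PySem.List.sorted_perm (P ++ l') (fun c => c) false).count_eq]
    have h1 : l.count c = 0 := by
      rw [List.count_eq_zero]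
      intro hm
      exact absurd (hl c hm) (not_le.mpr hc)
    have h2 : l'.count c = 0 := by
      rw [List.count_eq_zero]
      intro hm
      exact absurd (hl' c hm) (by intro h; exact absurd (h.trans hc) (lt_irrefl x))
    have h3 : c ≠ x := fun h => absurd hc (by simp [h])
    simp [List.count_append, List.count_cons_of_ne (Ne.symm h3), h1, h2]

-- A's candidate strings come out in strictly increasing order
theorem cwr_map_sorted_strict : ∀ (r : Nat) (pool P : List Char), pool.Pairwise (· < ·) →
    ((cwr r pool).map (fun l => String.ofList (PySem.List.sorted (P ++ l) (fun c => c)))).Pairwise (· < ·) := by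
  intro r
  induction r with
  | zero => intro pool P _; simp [cwr]
  | succ r ih =>
    intro pool
    induction pool with
    | nil => intro P _; simp [cwr]
    | cons x xs ihp =>
      intro P hpool
      have hxlt : ∀ c ∈ xs, x < c := (List.pairwise_cons.mp hpool).1
      have hxs : xs.Pairwise (· < ·) := (List.pairwise_cons.mp hpool).2
      show List.Pairwise (· < ·) (((x :: xs).tails.flatMap _).map _)
      rw [List.tails_cons, List.flatMap_cons]
      have hrest : (xs.tails.flatMap (fun sfx =>
          match sfx with
          | [] => []
          | y :: ys => (cwr r (y :: ys)).map (fun l => y :: l))) = cwr (r+1) xs := rfl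
      rw [hrest, List.map_append, List.pairwise_append]
      refine ⟨?_, ihp P hxs, ?_⟩
      · rw [List.map_map]
        have : ((fun l => String.ofList (PySem.List.sorted (P ++ l) (fun c => c))) ∘ (fun l => x :: l))
            = (fun l => String.ofList (PySem.List.sorted ((P ++ [x]) ++ l) (fun c => c))) := by
          funext l
          simp only [Function.comp_apply]
          rw [← List.append_cons]
        rw [this]
        exact ih (x :: xs) (P ++ [x]) hpool
      · intro a ha b hb
        simp only [List.map_map, List.mem_map, Function.comp_apply] at ha hb
        obtain ⟨l, hl, rfl⟩ := ha
        obtain ⟨l', hl', rfl⟩ := hb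
        rw [ofList_lt_iff]
        apply cross_lt P l l' x
        · rw [length_of_mem_cwr r (x :: xs) l hl, length_of_mem_cwr (r+1) xs l' hl']
        · intro c hc
          rcases List.mem_cons.mp (subset_of_mem_cwr r (x :: xs) l hl c hc) with rfl | h
          · exact le_refl c
          · exact le_of_lt (hxlt c h)
        · intro c hc
          exact hxlt c (subset_of_mem_cwr (r+1) xs l' hl' c hc)

-- the loop of feasible: need's letters fit into chars with lowercase leftovers
theorem feasibleLoop_spec : ∀ (need chars : List Char), feasibleLoop need chars = true ↔
    ((∀ c, need.count c ≤ chars.count c) ∧ ∀ c, need.count c < chars.count c → c ∈ lowercaseChars) := by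
  intro need
  induction need with
  | nil =>
    intro chars
    simp only [feasibleLoop, List.all_eq_true, List.count_nil]
    constructor
    · intro h
      exact ⟨fun c => Nat.zero_le _, fun c hc => by
        have : c ∈ chars := List.count_pos_iff.mp hc
        exact List.contains_iff_mem.mp (h c this)⟩
    · intro ⟨_, h2⟩ c hc
      exact List.contains_iff_mem.mpr (h2 c (List.count_pos_iff.mpr hc))
  | cons c rest ih =>
    intro chars
    simp only [feasibleLoop]
    by_cases hm : chars.contains c = true
    · rw [if_pos hm, ih (chars.erase c)]
      have hcm : c ∈ chars := List.contains_iff_mem.mp hm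
      constructor
      · intro ⟨h1, h2⟩
        constructor
        · intro d
          by_cases hdc : d = c
          · subst hdc
            have := h1 d
            rw [List.count_erase_self] at this
            rw [List.count_cons_self]
            have hpos : 0 < chars.count d := List.count_pos_iff.mpr hcm
            omega
          · have := h1 d
            rw [List.count_erase_of_ne hdc] at this
            rw [List.count_cons_of_ne (Ne.symm hdc)]
            exact this
        · intro d hd
          by_cases hdc : d = c
          · subst hdc
            apply h2 d
            rw [List.count_erase_self]
            rw [List.count_cons_self] at hd
            omega
          · apply h2 d
            rw [List.count_erase_of_ne hdc]
            rw [List.count_cons_of_ne (Ne.symm hdc)] at hd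
            exact hd
      · intro ⟨h1, h2⟩
        constructor
        · intro d
          by_cases hdc : d = c
          · subst hdc
            have := h1 d
            rw [List.count_cons_self] at this
            rw [List.count_erase_self]
            omega
          · have := h1 d
            rw [List.count_cons_of_ne (Ne.symm hdc)] at this
            rw [List.count_erase_of_ne hdc]
            exact this
        · intro d hd
          by_cases hdc : d = c
          · subst hdc
            apply h2 d
            rw [List.count_cons_self]
            rw [List.count_erase_self] at hd
            omega
          · apply h2 d
            rw [List.count_cons_of_ne (Ne.symm hdc)]
            rw [List.count_erase_of_ne hdc] at hd
            exact hd
    · rw [if_neg hm]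
      constructor
      · intro h; exact absurd h (by simp)
      intro ⟨h1, _⟩
      exfalso
      have := h1 c
      rw [List.count_cons_self] at this
      have : c ∈ chars := List.count_pos_iff.mp (by omega)
      exact hm (List.contains_iff_mem.mpr this)

theorem feasible_iff (x partial_ : String) : feasible x partial_ = true ↔
    (x.toList.Pairwise (· ≤ ·) ∧ feasibleLoop partial_.toList x.toList = true) := by
  unfold feasible
  by_cases h : x.toList.Pairwise (· ≤ ·)
  · rw [PySem.List.sorted_eq_self_of_pairwise x.toList (fun c => c) (by simpa using h)]
    simp [h]
  · have hne : x.toList ≠ PySem.List.sorted x.toList (fun c => c) := by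
      intro he
      exact h (by simpa using he ▸ PySem.List.sorted_pairwise x.toList (fun c => c))
    simp only [if_neg hne]
    simp [h]

-- the bridge: a string is one of A's candidates iff B's test accepts it
theorem candidate_iff_feasible (partial_ : String) (u : Nat) (x : String) :
    (∃ l ∈ cwr u lowercaseChars,
        String.ofList (PySem.List.sorted (partial_.toList ++ l) (fun c => c)) = x) ↔
      ((PySem.Str.len x == PySem.Str.len partial_ + (u : Int)) && feasible x partial_) = true := by
  rw [Bool.and_eq_true, beq_iff_eq, PySem.Str.len_eq, PySem.Str.len_eq, feasible_iff,
      feasibleLoop_spec]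
  constructor
  · rintro ⟨l, hl, rfl⟩
    have hlen := length_of_mem_cwr u lowercaseChars l hl
    have hsub := subset_of_mem_cwr u lowercaseChars l hl
    have hT : (String.ofList (PySem.List.sorted (partial_.toList ++ l) (fun c => c))).toList
        = PySem.List.sorted (partial_.toList ++ l) (fun c => c) := String.toList_ofList
    rw [hT]
    have hperm := PySem.List.sorted_perm (partial_.toList ++ l) (fun c => c) false
    refine ⟨?_, ?_, ?_, ?_⟩
    · rw [hperm.length_eq, List.length_append, hlen]; push_cast; ring
    · simpa using PySem.List.sorted_pairwise (partial_.toList ++ l) (fun c => c)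
    · intro c
      rw [hperm.count_eq, List.count_append]
      omega
    · intro c hc
      rw [hperm.count_eq, List.count_append] at hc
      have : 0 < l.count c := by omega
      exact hsub c (List.count_pos_iff.mp this)
  · rintro ⟨hlen, hsorted, h1, h2⟩
    set T := x.toList with hTdef
    set P := partial_.toList with hPdef
    set l := T.diff P with hldef
    have hcnt : ∀ c, (P ++ l).count c = T.count c := by
      intro c
      rw [List.count_append, hldef, List.count_diff]
      have := h1 c
      omega
    have hperm : (P ++ l).Perm T := List.perm_iff_count.mpr hcnt
    have hlsort : l.Pairwise (· ≤ ·) := hsorted.sublist (List.diff_sublist T P)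
    have hlsub : ∀ c ∈ l, c ∈ lowercaseChars := by
      intro c hc
      apply h2 c
      have : 0 < l.count c := List.count_pos_iff.mpr hc
      rw [hldef, List.count_diff] at this
      omega
    have hllen : l.length = u := by
      have := hperm.length_eq
      rw [List.length_append] at this
      omega
    have hmem : l ∈ cwr u lowercaseChars := by
      rw [← hllen]
      exact mem_cwr_of_sorted l lowercaseChars (by decide) hlsort hlsub
    refine ⟨l, hmem, ?_⟩
    rw [PySem.List.sorted_eq_sorted_of_perm (P ++ l) T (fun c => c) (fun a b h => h) hperm,
        PySem.List.sorted_eq_self_of_pairwise T (fun c => c) (by simpa using hsorted)]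
    exact String.ofList_toList

-- ===== VERDICT (by name: the statement is the Claim_ definition above) =====
theorem search_spec : Claim_equal_search := by
  intro anagrams partial_ unknown _ hpre
  unfold Pre_search at hpre
  unfold Spec_search
  have hu : ((unknown.toNat : Int)) = unknown := Int.toNat_of_nonneg hpre
  set u := unknown.toNat with hudef
  set f : List Char → String :=
    fun l => String.ofList (PySem.List.sorted (partial_.toList ++ l) (fun c => c)) with hf
  set cond2 : String → Bool :=
    fun s => PySem.Str.len s == PySem.Str.len partial_ + unknown && feasible s partial_ with hcond2
  have hA : search anagrams partial_ unknown
      = PySem.Set.ofList (((cwr u lowercaseChars).map f).filter (fun y => anagrams.contains y)) := by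
    rw [← foldl_add_if_eq_ofList_filter, List.foldl_map]
    rfl
  have hB : search_alt anagrams partial_ unknown
      = PySem.Set.ofList ((PySem.List.sorted anagrams (fun s => s)).filter cond2) := by
    rw [← foldl_add_if_eq_ofList_filter]
    rfl
  set F := ((cwr u lowercaseChars).map f).filter (fun y => anagrams.contains y) with hF
  set G := (PySem.List.sorted anagrams (fun s => s)).filter cond2 with hG
  have hFstrict : F.Pairwise (· < ·) :=
    List.Pairwise.sublist List.filter_sublist
      (cwr_map_sorted_strict u lowercaseChars partial_.toList (by decide))
  have hFnodup : F.Nodup := hFstrict.imp (fun h => ne_of_lt h)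
  have hAF : PySem.Set.ofList F = F := by
    rw [PySem.Set.ofList_eq_foldl]
    simpa using foldl_add_eq_append_of_nodup F [] (by simpa using hFnodup)
  have hGle : G.Pairwise (· ≤ ·) :=
    List.Pairwise.sublist List.filter_sublist (PySem.List.sorted_pairwise anagrams (fun s => s))
  have hOGsub : (PySem.Set.ofList G).Sublist G := by
    rw [PySem.Set.ofList_eq_foldl]
    simpa using sublist_foldl_add G []
  have hOGnodup : (PySem.Set.ofList G).Nodup := PySem.Set.nodup_ofList G
  have hOGstrict : (PySem.Set.ofList G).Pairwise (· < ·) :=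
    ((List.Pairwise.sublist hOGsub hGle).and hOGnodup).imp (fun h => lt_of_le_of_ne h.1 h.2)
  have hmem : ∀ x, x ∈ F ↔ x ∈ PySem.Set.ofList G := by
    intro x
    rw [PySem.Set.mem_ofList, hF, hG, List.mem_filter, List.mem_filter,
        PySem.List.mem_sorted, List.mem_map]
    constructor
    · rintro ⟨⟨l, hl, rfl⟩, hcont⟩
      refine ⟨List.contains_iff_mem.mp hcont, ?_⟩
      rw [hcond2, ← hu]
      exact (candidate_iff_feasible partial_ u (f l)).mp ⟨l, hl, rfl⟩
    · rintro ⟨hmem', hcond⟩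
      rw [hcond2, ← hu] at hcond
      obtain ⟨l, hl, hfl⟩ := (candidate_iff_feasible partial_ u x).mpr hcond
      exact ⟨⟨l, hl, hfl⟩, List.contains_iff_mem.mpr hmem'⟩
  have hperm : (PySem.Set.ofList G).Perm F :=
    (List.perm_ext_iff_of_nodup hOGnodup hFnodup).mpr (fun a => (hmem a).symm)
  have hFG : F = PySem.Set.ofList G := by
    rw [← PySem.List.sorted_eq_of_perm_of_pairwise_lt F (PySem.Set.ofList G) (fun s => s) hperm hOGstrict]
    exact (PySem.List.sorted_eq_self_of_pairwise F (fun s => s)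
      (hFstrict.imp (fun h => le_of_lt h))).symm
  rw [hA, hB, hAF, hFG]
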